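-- pv_equiv track=rewrite | github.com/S302-prog/Proyecto-0 | bloques.py | solo_un_bloque
-- ===== SOURCE A (Python) =====
-- def solo_un_bloque(text: str) -> bool:
-- 	parentesis = 0
-- 	abierto = False
-- 	cerradas = 0
--
-- 	for t in text:
-- 		if parentesis < 0: return False
-- 		if t == "(":
-- 			parentesis += 1
-- 			abierto = True
-- 		elif t == ")":
-- 			parentesis -= 1
-- 		if parentesis == 0 and abierto:
-- 			cerradas += 1
-- 	return cerradas == 1
-- ===== SOURCE B (Python) =====
-- def solo_un_bloque(text: str) -> bool:
--     # prefix balances: balance[i] = depth of nesting after reading text[:i+1]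
--     balance = []
--     b = 0
--     for t in text:
--         if t == "(":
--             b += 1
--         elif t == ")":
--             b -= 1
--         balance.append(b)
--     # a ')' without a matching '(' makes the text invalid
--     if any(x < 0 for x in balance):
--         return False
--     first = text.find("(")
--     if first == -1:
--         return False
--     # exactly one block: the balance returns to zero exactly once after the
--     # first '(' (trailing text after the block would add further zeros)
--     return balance[first:].count(0) == 1
-- ===== Notes on version B (the rewrite author's own statement) =====
-- stated objective: alternative
-- what changed: Replaces A's single interleaved stateful loop (balance + opened-flag + zero-counter with an in-loop negative check) by a prefix-balance table built once, then a separate scan for negative balances and a count of zero balances from the first '(' onward.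
-- intended difference: On strings whose prefix balances are nonnegative and return to zero exactly once after the first '(' before a final extra ')' (e.g. '())'), A returns True because its negative-balance check runs at the start of each iteration and never inspects the balance after the last character, while B returns False, the intended answer since the text contains an unmatched ')'. — e.g. on solo_un_bloque("())"): A returns true, B returns false
import Mathlib
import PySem

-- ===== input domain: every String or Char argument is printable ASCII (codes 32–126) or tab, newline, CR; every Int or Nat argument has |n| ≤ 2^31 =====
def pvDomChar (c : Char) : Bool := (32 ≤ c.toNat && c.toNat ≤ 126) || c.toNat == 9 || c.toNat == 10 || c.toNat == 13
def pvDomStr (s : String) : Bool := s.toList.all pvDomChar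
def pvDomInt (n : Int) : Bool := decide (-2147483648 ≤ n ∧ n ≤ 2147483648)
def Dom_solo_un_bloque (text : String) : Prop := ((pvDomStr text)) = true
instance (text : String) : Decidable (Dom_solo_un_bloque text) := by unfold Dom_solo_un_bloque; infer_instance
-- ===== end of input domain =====

-- B replaces A's single interleaved stateful loop by a prefix-balance table plus
-- two separate scans; where A ignores a negative balance reached only by the final
-- character, B returns False (stated as intended difference D_ below).

-- ===== PORT A =====
-- literal transliteration of A's loop: state (parentesis, abierto, cerradas),
-- early `return False` becomes the first branch.
def pvALoop : List Char → Int → Bool → Int → Bool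
  | [], _, _, cerradas => cerradas == 1
  | t :: ts, parentesis, abierto, cerradas =>
    if parentesis < 0 then false
    else
      let parentesis' := if t == '(' then parentesis + 1
                         else if t == ')' then parentesis - 1 else parentesis
      let abierto' := if t == '(' then true else abierto
      let cerradas' := if parentesis' == 0 && abierto' then cerradas + 1 else cerradas
      pvALoop ts parentesis' abierto' cerradas'

def solo_un_bloque (text : String) : Bool := pvALoop text.toList 0 false 0

-- ===== PORT B =====
-- prefix-balance table (Source B's first loop)
def pvBalances : List Char → Int → List Int
  | [], _ => []
  | t :: ts, b =>
    let b' := if t == '(' then b + 1 else if t == ')' then b - 1 else b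
    b' :: pvBalances ts b'

def solo_un_bloque_alt (text : String) : Bool :=
  let bal := pvBalances text.toList 0
  if bal.any (fun x => decide (x < 0)) then false
  else
    match text.toList.findIdx? (fun t => t == '(') with
    | none => false
    | some first => (bal.drop first).count 0 == 1

-- ===== PRECONDITION & SPEC =====
-- helper for the change region D_ (independent of both ports): net balance of a string
def pvBal (cs : List Char) : Int := (cs.count '(' : Int) - cs.count ')'

-- On strings whose prefix balances are nonnegative and return to zero exactly once
-- after the first '(' before a final extra ')' (e.g. "())"), A returns true because
-- its negative-balance check runs at the start of each iteration and never inspects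
-- the balance after the last character, while B returns false, the intended answer
-- since the text contains an unmatched ')'.
def D_solo_un_bloque (text : String) : Prop :=
  pvBal text.toList < 0 ∧ (∀ p ∈ text.toList.inits.dropLast, 0 ≤ pvBal p) ∧
  text.toList.inits.countP (fun p => pvBal p == 0 && p.contains '(') = 1
instance (text : String) : Decidable (D_solo_un_bloque text) := by unfold D_solo_un_bloque; infer_instance

def Spec_solo_un_bloque (text : String) (out : Bool) : Prop := ¬ D_solo_un_bloque text → out = solo_un_bloque_alt text
instance (text : String) (out : Bool) : Decidable (Spec_solo_un_bloque text out) := by unfold Spec_solo_un_bloque; infer_instance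

def pvDiffWitness_solo_un_bloque : String := "())"
def pvDiffWitnessOut_solo_un_bloque : Bool × Bool := (true, false)

-- ===== CLAIM (what is proved, stated in full; the proofs are below) =====
def Claim_unchanged_solo_un_bloque : Prop := ∀ (text : String), Dom_solo_un_bloque text → Spec_solo_un_bloque text (solo_un_bloque text)
def Claim_changed_solo_un_bloque : Prop := Dom_solo_un_bloque (pvDiffWitness_solo_un_bloque) ∧ D_solo_un_bloque (pvDiffWitness_solo_un_bloque) ∧ solo_un_bloque (pvDiffWitness_solo_un_bloque) = pvDiffWitnessOut_solo_un_bloque.1 ∧ solo_un_bloque_alt (pvDiffWitness_solo_un_bloque) = pvDiffWitnessOut_solo_un_bloque.2 ∧ pvDiffWitnessOut_solo_un_bloque.1 ≠ pvDiffWitnessOut_solo_un_bloque.2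
def Claim_exact_solo_un_bloque : Prop := ∀ (text : String), Dom_solo_un_bloque text → D_solo_un_bloque text → solo_un_bloque text ≠ solo_un_bloque_alt text

-- ===== LEMMAS AND PROOFS =====

-- whether A's start-of-iteration check `parentesis < 0` ever fires
def pvBad : List Char → Int → Bool
  | [], _ => false
  | t :: ts, p =>
    decide (p < 0) ||
      pvBad ts (if t == '(' then p + 1 else if t == ')' then p - 1 else p)

-- zeros counted by A: positions whose balance is 0 after the opened-flag is set
def pvZC : List Char → Int → Bool → Nat
  | [], _, _ => 0
  | t :: ts, p, ab =>
    let p' := if t == '(' then p + 1 else if t == ')' then p - 1 else p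
    let ab' := if t == '(' then true else ab
    (if p' == 0 && ab' then 1 else 0) + pvZC ts p' ab'

theorem pvALoop_char : ∀ (cs : List Char) (p : Int) (ab : Bool) (c : Int),
    pvALoop cs p ab c = if pvBad cs p then false else decide (c + (pvZC cs p ab : Int) = 1) := by
  intro cs
  induction cs with
  | nil =>
    intro p ab c
    rw [pvALoop, pvBad, pvZC]
    by_cases h : c = 1 <;> simp [h]
  | cons t ts ih =>
    intro p ab c
    by_cases hp : p < 0
    · rw [pvALoop, pvBad]
      simp [hp]
    · rw [pvALoop, pvBad, pvZC]
      simp only [hp, decide_false, Bool.false_or]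
      rw [ih]
      split_ifs <;> try rfl
      all_goals try exact False.elim (by assumption)
      all_goals rw [decide_eq_decide]; push_cast; omega

-- dropLast commutes with the balance scan
theorem pvBalances_dropLast : ∀ (cs : List Char) (p : Int),
    (pvBalances cs p).dropLast = pvBalances cs.dropLast p := by
  intro cs
  induction cs with
  | nil => intro p; simp [pvBalances]
  | cons t ts ih =>
    intro p
    cases hts : ts with
    | nil => simp [pvBalances]
    | cons s ss =>
      subst hts
      rw [pvBalances]
      have hne : pvBalances (s :: ss) (if t == '(' then p + 1 else if t == ')' then p - 1 else p) ≠ [] := by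
        rw [pvBalances]; simp
      rw [List.dropLast_cons_of_ne_nil hne, ih,
        show (t :: s :: ss).dropLast = t :: (s :: ss).dropLast from
          List.dropLast_cons_of_ne_nil (by simp), pvBalances]

theorem pvBad_eq : ∀ (cs : List Char) (p : Int),
    pvBad cs p =
      ((decide (p < 0) && decide (cs ≠ [])) ||
        (pvBalances cs.dropLast p).any (fun x => decide (x < 0))) := by
  intro cs
  induction cs with
  | nil => intro p; simp [pvBad, pvBalances]
  | cons t ts ih =>
    intro p
    cases hts : ts with
    | nil => simp [pvBad, pvBalances]
    | cons s ss =>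
      subst hts
      rw [pvBad, ih,
        show (t :: s :: ss).dropLast = t :: (s :: ss).dropLast from
          List.dropLast_cons_of_ne_nil (by simp), pvBalances, List.any_cons]
      simp

theorem pvZC_true : ∀ (cs : List Char) (p : Int),
    pvZC cs p true = (pvBalances cs p).count 0 := by
  intro cs
  induction cs with
  | nil => intro p; simp [pvZC, pvBalances]
  | cons t ts ih =>
    intro p
    rw [pvZC, pvBalances, List.count_cons]
    simp only [ite_self, Bool.and_true]
    rw [ih]
    split_ifs <;> omega

theorem pvZC_false : ∀ (cs : List Char) (p : Int),
    pvZC cs p false =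
      ((pvBalances cs p).drop (cs.findIdx (fun t => t == '('))).count 0 := by
  intro cs
  induction cs with
  | nil => intro p; simp [pvZC, pvBalances]
  | cons t ts ih =>
    intro p
    by_cases ht : t = '('
    · subst ht
      rw [pvZC, pvBalances, List.findIdx_cons]
      simp only [beq_self_eq_true, if_true, cond_true, List.drop_zero,
        List.count_cons, Bool.and_true]
      rw [pvZC_true]
      split_ifs <;> omega
    · have ht' : (t == '(') = false := by simp [ht]
      rw [pvZC, pvBalances, List.findIdx_cons]
      simp only [ht', Bool.false_eq_true, if_false, cond_false, Bool.and_false, List.drop_succ_cons]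
      rw [ih]
      omega

theorem findIdx?_none_of (cs : List Char) (h : cs.findIdx? (fun t => t == '(') = none) :
    cs.findIdx (fun t => t == '(') = cs.length := by
  by_contra hne
  have hlt : cs.findIdx (fun t => t == '(') < cs.length :=
    lt_of_le_of_ne (List.findIdx_le_length) hne
  have := List.findIdx?_eq_none_iff.mp h
  have hmem := cs.findIdx_getElem (w := hlt)
  have := this _ (cs.getElem_mem hlt)
  simp_all

theorem pvBalances_length : ∀ (cs : List Char) (p : Int),
    (pvBalances cs p).length = cs.length := by
  intro cs
  induction cs with
  | nil => intro p; simp [pvBalances]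
  | cons t ts ih => intro p; rw [pvBalances]; simp [ih]

theorem pvShift (t : Char) (p : Int) :
    (if t == '(' then p + 1 else if t == ')' then p - 1 else p) =
      p + (if t = '(' then 1 else if t = ')' then -1 else 0) := by
  simp only [beq_iff_eq]
  split_ifs <;> omega

theorem pvBal_cons (c : Char) (p : List Char) :
    pvBal (c :: p) = (if c = '(' then 1 else if c = ')' then -1 else 0) + pvBal p := by
  simp only [pvBal, List.count_cons, beq_iff_eq]
  split_ifs <;> simp_all <;> omega

-- prefixes' net balances are exactly the balance table (with a leading b)
theorem inits_map_pvBal : ∀ (cs : List Char) (b : Int),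
    cs.inits.map (fun p => b + pvBal p) = b :: pvBalances cs b := by
  intro cs
  induction cs with
  | nil => intro b; simp [pvBal, pvBalances]
  | cons c cs ih =>
    intro b
    rw [List.inits_cons, List.map_cons, List.map_map]
    have hfun : ((fun p => b + pvBal p) ∘ fun t => c :: t) =
        fun p => (b + (if c = '(' then 1 else if c = ')' then -1 else 0)) + pvBal p := by
      funext p
      simp only [Function.comp_apply, pvBal_cons]
      ring
    rw [hfun, ih, pvBalances, pvShift]
    simp [pvBal]

-- counting zeros in a mapped list is a countP over the originals
theorem count_zero_map (g : List Char → Int) : ∀ (l : List (List Char)),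
    (l.map g).count 0 = l.countP (fun p => g p == 0) := by
  intro l
  induction l with
  | nil => simp
  | cons a l ih =>
    rw [List.map_cons, List.count_cons, List.countP_cons, ih]

theorem map_dropLast_eq (g : List Char → Int) : ∀ (l : List (List Char)),
    l.dropLast.map g = (l.map g).dropLast := by
  intro l
  induction l with
  | nil => simp
  | cons a l ih => cases l <;> simp_all

-- D_'s zero count over prefixes containing '(' is A's zero count from the first '('
theorem countP_inits : ∀ (cs : List Char) (b : Int),
    cs.inits.countP (fun p => b + pvBal p == 0 && p.contains '(') =
      ((pvBalances cs b).drop (cs.findIdx (fun t => t == '('))).count 0 := by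
  intro cs
  induction cs with
  | nil => intro b; simp [pvBalances]
  | cons c cs ih =>
    intro b
    rw [List.inits_cons, List.countP_cons, List.countP_map]
    by_cases hc : c = '('
    · subst hc
      have hfun : ((fun p => b + pvBal p == 0 && p.contains '(') ∘ fun t => '(' :: t) =
          fun p => (b + 1) + pvBal p == 0 := by
        funext p
        simp [pvBal_cons]
        ring_nf
      rw [hfun]
      rw [show ∀ l : List (List Char), l.countP (fun p => (b+1) + pvBal p == 0) =
            (l.map (fun p => (b+1) + pvBal p)).count 0 from fun l => (count_zero_map _ l).symm,
        inits_map_pvBal, List.findIdx_cons]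
      simp [pvBalances, List.count_cons]
    · have hc' : (c == '(') = false := by simp [hc]
      have hfun : ((fun p => b + pvBal p == 0 && p.contains '(') ∘ fun t => c :: t) =
          fun p => (b + (if c = '(' then 1 else if c = ')' then -1 else 0)) + pvBal p == 0
            && p.contains '(' := by
        funext p
        have h2c : ('(' == c) = false := by simpa using fun h => hc h.symm
        simp only [Function.comp_apply, pvBal_cons, List.contains_cons, h2c, Bool.false_or]
        rw [show b + ((if c = '(' then 1 else if c = ')' then -1 else 0) + pvBal p) =
              (b + (if c = '(' then 1 else if c = ')' then -1 else 0)) + pvBal p by ring]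
      rw [hfun, ih, List.findIdx_cons, hc']
      rw [pvBalances, pvShift]
      simp [hc]

-- the net balance is the last entry of the balance table
theorem pvBal_last : ∀ (cs : List Char) (b : Int),
    (pvBalances cs b).getLastD b = b + pvBal cs := by
  intro cs
  induction cs with
  | nil => intro b; simp [pvBal, pvBalances]
  | cons c cs ih =>
    intro b
    rw [pvBalances, List.getLastD_cons, ih, pvShift, pvBal_cons]
    ring

theorem pvBalances_append : ∀ (xs ys : List Char) (p : Int),
    pvBalances (xs ++ ys) p =
      pvBalances xs p ++ pvBalances ys ((pvBalances xs p).getLastD p) := by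
  intro xs
  induction xs with
  | nil => intro ys p; simp [pvBalances]
  | cons x xs ih =>
    intro ys p
    rw [List.cons_append, pvBalances, pvBalances, ih, List.cons_append, List.getLastD_cons]

theorem getLastD_mem_or (l : List Int) : l = [] ∨ l.getLastD 0 ∈ l := by
  cases l using List.reverseRecOn with
  | nil => exact Or.inl rfl
  | append_singleton xs x => right; simp

-- characterization of A via the balance table
theorem A_char (text : String) :
    solo_un_bloque text =
      if ((pvBalances text.toList 0).dropLast.any fun x => decide (x < 0)) then false
      else decide (((pvBalances text.toList 0).drop
              (text.toList.findIdx (fun t => t == '('))).count 0 = 1) := by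
  rw [solo_un_bloque, pvALoop_char, pvBad_eq, ← pvBalances_dropLast]
  simp only [(by decide : decide ((0:Int) < 0) = false), Bool.false_and, Bool.false_or]
  rw [pvZC_false]
  split_ifs with h
  · rfl
  · rw [decide_eq_decide]; omega

-- characterization of B via the balance table
theorem B_char (text : String) :
    solo_un_bloque_alt text =
      if ((pvBalances text.toList 0).any fun x => decide (x < 0)) then false
      else decide (((pvBalances text.toList 0).drop
              (text.toList.findIdx (fun t => t == '('))).count 0 = 1) := by
  cases hf : text.toList.findIdx? (fun t => t == '(') with
  | none =>
    have hlen := findIdx?_none_of _ hf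
    by_cases h : ((pvBalances text.toList 0).any fun x => decide (x < 0)) = true
    · simp [solo_un_bloque_alt, h]
    · simp only [Bool.not_eq_true] at h
      have h0 : List.drop text.length (pvBalances text.toList 0) = [] :=
        List.drop_eq_nil_of_le (by simp [pvBalances_length])
      simp [solo_un_bloque_alt, hf, h, hlen, h0]
  | some k =>
    have hk : text.toList.findIdx (fun t => t == '(') = k :=
      (List.findIdx?_eq_some_iff_findIdx_eq.mp hf).2
    by_cases h : ((pvBalances text.toList 0).any fun x => decide (x < 0)) = true
    · simp [solo_un_bloque_alt, h]
    · simp only [Bool.not_eq_true] at h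
      by_cases hcnt : ((pvBalances text.toList 0).drop k).count 0 = 1 <;>
        simp [solo_un_bloque_alt, hf, h, hk, hcnt]

-- decomposition of the key case: balances nonnegative except at the very last
-- character forces exactly the shape D_ describes.
theorem key_case (cs : List Char)
    (h1 : ((pvBalances cs 0).dropLast.any fun x => decide (x < 0)) = false)
    (h2 : ((pvBalances cs 0).any fun x => decide (x < 0)) = true)
    (hcnt : ((pvBalances cs 0).drop (cs.findIdx (fun t => t == '('))).count 0 = 1) :
    pvBal cs < 0 ∧ (∀ p ∈ cs.inits.dropLast, 0 ≤ pvBal p) ∧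
    cs.inits.countP (fun p => pvBal p == 0 && p.contains '(') = 1 := by
  have hne : cs ≠ [] := by
    rintro rfl; rw [pvBalances] at h2; simp at h2
  set csD := cs.dropLast with hcsD
  set c := cs.getLast hne with hc
  have hdec : cs = csD ++ [c] := (List.dropLast_append_getLast hne).symm
  set balD := pvBalances csD 0 with hbalD
  set q := balD.getLastD 0 with hq
  set q' := if c == '(' then q + 1 else if c == ')' then q - 1 else q with hq'
  have hbal : pvBalances cs 0 = balD ++ [q'] := by
    rw [hdec, pvBalances_append, ← hbalD, ← hq, hq']
    simp [pvBalances]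
  have hdropLast : (pvBalances cs 0).dropLast = balD := by
    rw [hbal, List.dropLast_concat]
  rw [hdropLast] at h1
  have hall : ∀ x ∈ balD, 0 ≤ x := by
    intro x hx
    have := (List.any_eq_false.mp h1) x hx
    simpa using this
  have hq0 : 0 ≤ q := by
    rcases getLastD_mem_or balD with h | h
    · rw [hq, h]; rfl
    · exact hall _ h
  have hq'neg : q' < 0 := by
    rw [hbal] at h2
    rcases List.any_eq_true.mp h2 with ⟨x, hx, hxneg⟩
    rcases List.mem_append.mp hx with hx | hx
    · exact absurd (of_decide_eq_true hxneg) (not_lt.mpr (hall _ hx))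
    · simp only [List.mem_singleton] at hx
      subst hx; exact of_decide_eq_true hxneg
  refine ⟨?_, ?_, ?_⟩
  · have := pvBal_last cs 0
    rw [hbal, List.getLastD_concat] at this
    omega
  · intro p hp
    have hmem : pvBal p ∈ cs.inits.dropLast.map pvBal := List.mem_map_of_mem hp
    rw [map_dropLast_eq] at hmem
    have h0 : cs.inits.map pvBal = 0 :: pvBalances cs 0 := by
      have := inits_map_pvBal cs 0
      simpa using this
    rw [h0, hbal, ← List.cons_append, List.dropLast_concat] at hmem
    rcases List.mem_cons.mp hmem with h | h
    · omega
    · exact hall _ h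
  · have := countP_inits cs 0
    simp only [zero_add] at this
    rw [this]
    exact hcnt

-- any over dropLast implies any over the whole list
theorem any_of_any_dropLast (l : List Int) (p : Int → Bool)
    (h : l.dropLast.any p = true) : l.any p = true := by
  rcases List.any_eq_true.mp h with ⟨x, hx, hpx⟩
  exact List.any_eq_true.mpr ⟨x, List.mem_of_mem_dropLast hx, hpx⟩

-- D_ (restated through pvBalances) forces A = true and B = false
theorem D_case (cs : List Char)
    (hD1 : pvBal cs < 0)
    (hD2 : ∀ p ∈ cs.inits.dropLast, 0 ≤ pvBal p)
    (hD3 : cs.inits.countP (fun p => pvBal p == 0 && p.contains '(') = 1) :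
    ((pvBalances cs 0).dropLast.any fun x => decide (x < 0)) = false ∧
    ((pvBalances cs 0).any fun x => decide (x < 0)) = true ∧
    ((pvBalances cs 0).drop (cs.findIdx (fun t => t == '('))).count 0 = 1 := by
  have hlast : (pvBalances cs 0).getLastD 0 < 0 := by
    rw [pvBal_last]; omega
  have hne : pvBalances cs 0 ≠ [] := by
    rintro hb; rw [hb] at hlast; simp at hlast
  have h0 : cs.inits.map pvBal = 0 :: pvBalances cs 0 := by
    have := inits_map_pvBal cs 0
    simpa using this
  refine ⟨?_, ?_, ?_⟩
  · refine List.any_eq_false.mpr ?_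
    intro x hx
    have hx' : x ∈ (cs.inits.map pvBal).dropLast := by
      rw [h0, List.dropLast_cons_of_ne_nil hne]
      exact List.mem_cons_of_mem _ hx
    rw [← map_dropLast_eq] at hx'
    rcases List.mem_map.mp hx' with ⟨p, hp, rfl⟩
    simpa using not_lt.mpr (hD2 p hp)
  · rcases getLastD_mem_or (pvBalances cs 0) with h | h
    · exact absurd h hne
    · exact List.any_eq_true.mpr ⟨_, h, decide_eq_true hlast⟩
  · have := countP_inits cs 0
    simp only [zero_add] at this
    rw [← this]
    exact hD3

-- ===== VERDICT (by name: the statements are the Claim_ definitions above) =====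
theorem solo_un_bloque_spec : Claim_unchanged_solo_un_bloque := by
  intro text _ hD
  rw [A_char, B_char]
  by_cases h1 : ((pvBalances text.toList 0).dropLast.any fun x => decide (x < 0)) = true
  · rw [if_pos h1, if_pos (any_of_any_dropLast _ _ h1)]
  · rw [if_neg h1]
    by_cases h2 : ((pvBalances text.toList 0).any fun x => decide (x < 0)) = true
    · rw [if_pos h2]
      by_cases hcnt : ((pvBalances text.toList 0).drop
          (text.toList.findIdx (fun t => t == '('))).count 0 = 1
      · exact absurd (key_case text.toList (by simpa using h1) h2 hcnt) hD
      · simp [hcnt]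
    · rw [if_neg h2]

theorem solo_un_bloque_changed : Claim_changed_solo_un_bloque := by
  unfold Claim_changed_solo_un_bloque; decide

theorem solo_un_bloque_tight : Claim_exact_solo_un_bloque := by
  intro text _ hD
  obtain ⟨d1, d2, d3⟩ := hD
  obtain ⟨h1, h2, hcnt⟩ := D_case text.toList d1 d2 d3
  rw [A_char, B_char, if_neg (by simp [h1]), if_pos h2, decide_eq_true hcnt]
  decide
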